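-- pv_equiv track=rewrite | github.com/RunpengLuo/universal-genotyping | resources/scripts/window_bed_utils.py | _tile_region
-- ===== SOURCE A (Python) =====
-- def _tile_region(chrom, start, end, window_size):
--     """Tile a single region into fixed-size windows, merging last short bin.
--
--     If the last window is shorter than window_size // 2 and there is a previous
--     window, it is merged into the previous window (extending its END).  Regions
--     smaller than window_size // 2 still emit one window.
--     """
--     rows = []
--     pos = start
--     while pos < end:
--         w_end = min(pos + window_size, end)
--         rows.append([chrom, pos, w_end])
--         pos = w_end
--     # Merge last bin into previous if undersized
--     if len(rows) > 1 and (rows[-1][2] - rows[-1][1]) < window_size // 2: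
--         rows[-2][2] = rows[-1][2]
--         rows.pop()
--     return rows
-- ===== SOURCE B (Python) =====
-- def _tile_region(chrom, start, end, window_size):
--     # Boundary-list formulation: compute window boundaries with range(),
--     # prune one boundary to merge an undersized last bin, then pair up.
--     bounds = list(range(start, end, window_size))
--     if bounds:
--         bounds.append(end)
--     if len(bounds) >= 3 and bounds[-1] - bounds[-2] < window_size // 2:
--         del bounds[-2]
--     return [[chrom, lo, hi] for lo, hi in zip(bounds, bounds[1:])]
-- ===== Notes on version B (the rewrite author's own statement) =====
-- stated objective: simpler
-- what changed: Replaces A's incremental while-loop (append rows, then pop/patch to merge the short last bin) by an explicit boundary list from range(), a single boundary deletion for the merge, and one pairing pass over consecutive boundaries.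
-- outside the precondition, e.g. on _tile_region('chr1', 5, 3, 0): A returns [], B raises ValueError; on _tile_region('chr1', 5, 3, -1): A returns [], B returns [('chr1', 5, 4), ('chr1', 4, 3)]
import Mathlib
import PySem

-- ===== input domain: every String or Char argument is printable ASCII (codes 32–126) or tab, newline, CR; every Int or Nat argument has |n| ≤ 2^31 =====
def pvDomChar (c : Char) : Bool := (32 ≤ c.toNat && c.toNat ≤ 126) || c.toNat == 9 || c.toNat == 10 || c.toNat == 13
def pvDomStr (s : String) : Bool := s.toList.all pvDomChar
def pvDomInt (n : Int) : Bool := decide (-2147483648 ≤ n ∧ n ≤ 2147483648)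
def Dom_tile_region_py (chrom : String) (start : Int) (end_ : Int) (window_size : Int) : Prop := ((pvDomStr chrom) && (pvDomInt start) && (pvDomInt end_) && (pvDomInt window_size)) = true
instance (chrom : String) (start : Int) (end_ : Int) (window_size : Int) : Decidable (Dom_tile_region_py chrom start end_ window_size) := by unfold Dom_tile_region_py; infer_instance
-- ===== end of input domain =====

-- B replaces A's incremental while-loop-then-pop by an explicit boundary list,
-- a single boundary deletion for the merge, and one pairing pass (objective: simpler).


-- ===== PORT A =====
-- the while-loop; fuel (end_ - start).toNat is enough since each iteration advances pos by ≥ 1 when window_size ≥ 1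
def tileLoopA (chrom : String) (end_ ws : Int) : Nat → Int → List (String × Int × Int)
  | 0, _ => []
  | fuel + 1, pos =>
      if pos < end_ then
        let w_end := min (pos + ws) end_
        (chrom, pos, w_end) :: tileLoopA chrom end_ ws fuel w_end
      else []

def tile_region_py (chrom : String) (start : Int) (end_ : Int) (window_size : Int) : List (String × Int × Int) :=
  let rows := tileLoopA chrom end_ window_size (end_ - start).toNat start
  -- if len(rows) > 1 and rows[-1][2] - rows[-1][1] < ws // 2: rows[-2][2] = rows[-1][2]; rows.pop()
  match rows.reverse with
  | last :: prev :: rest =>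
      if last.2.2 - last.2.1 < PySem.Int.floordiv window_size 2 then
        ((prev.1, prev.2.1, last.2.2) :: rest).reverse
      else rows
  | _ => rows

-- ===== PORT B =====
def tile_region_py_alt (chrom : String) (start : Int) (end_ : Int) (window_size : Int) : List (String × Int × Int) :=
  let b0 := PySem.List.pyRange start end_ window_size
  let bounds := if b0 ≠ [] then b0 ++ [end_] else b0
  -- if len(bounds) >= 3 and bounds[-1] - bounds[-2] < ws // 2: del bounds[-2]
  let bounds2 :=
    if 3 ≤ bounds.length ∧
        PySem.List.pyGetD bounds (-1) 0 - PySem.List.pyGetD bounds (-2) 0 <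
          PySem.Int.floordiv window_size 2 then
      bounds.dropLast.dropLast ++ [PySem.List.pyGetD bounds (-1) 0]  -- del bounds[-2]
    else bounds
  (bounds2.zip bounds2.tail).map (fun ab => (chrom, ab.1, ab.2))

-- ===== PRECONDITION & SPEC =====
-- Nonpositive window_size is outside the natural domain: A infinite-loops whenever start < end
-- and only returns [] degenerately when start ≥ end, while B's range() raises on step 0 or tiles
-- backwards on a negative step; Pre_ restricts to positive window sizes.
def Pre_tile_region_py (chrom : String) (start : Int) (end_ : Int) (window_size : Int) : Prop :=
  0 < window_size
instance (chrom : String) (start : Int) (end_ : Int) (window_size : Int) : Decidable (Pre_tile_region_py chrom start end_ window_size) := by unfold Pre_tile_region_py; infer_instance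

def pvWitness_tile_region_py : String × Int × Int × Int := ("chr1", 0, 25, 10)

def Spec_tile_region_py (chrom : String) (start : Int) (end_ : Int) (window_size : Int) (out : List (String × Int × Int)) : Prop := out = tile_region_py_alt chrom start end_ window_size
instance (chrom : String) (start : Int) (end_ : Int) (window_size : Int) (out : List (String × Int × Int)) : Decidable (Spec_tile_region_py chrom start end_ window_size out) := by unfold Spec_tile_region_py; infer_instance

-- ===== CLAIM (what is proved, stated in full; the proofs are below) =====
def Claim_equal_tile_region_py : Prop := ∀ (chrom : String) (start : Int) (end_ : Int) (window_size : Int), Dom_tile_region_py chrom start end_ window_size → Pre_tile_region_py chrom start end_ window_size → Spec_tile_region_py chrom start end_ window_size (tile_region_py chrom start end_ window_size)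

-- ===== LEMMAS AND PROOFS =====

-- pair up consecutive boundaries (the last step of B)
def zipPairs (chrom : String) (xs : List Int) : List (String × Int × Int) :=
  (xs.zip xs.tail).map (fun ab => (chrom, ab.1, ab.2))

theorem zipPairs_cons₂ (chrom : String) (x y : Int) (t : List Int) :
    zipPairs chrom (x :: y :: t) = (chrom, x, y) :: zipPairs chrom (y :: t) := rfl

theorem pyRange_nil_of_pos {a b s : Int} (hs : 0 < s) (h : b ≤ a) :
    PySem.List.pyRange a b s = [] := by
  rw [PySem.List.pyRange_of_pos a b hs, if_neg (by omega)]
  simp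

theorem pyRange_cons_of_pos {a b s : Int} (hs : 0 < s) (h : a < b) :
    PySem.List.pyRange a b s = a :: PySem.List.pyRange (a + s) b s := by
  rw [PySem.List.pyRange_of_pos a b hs, PySem.List.pyRange_of_pos (a + s) b hs, if_pos h]
  by_cases h2 : a + s < b
  · rw [if_pos h2]
    have e1 : ((b - a + s - 1) / s).toNat = ((b - (a + s) + s - 1) / s).toNat + 1 := by
      have : b - a + s - 1 = (b - (a + s) + s - 1) + 1 * s := by ring
      rw [this, Int.add_mul_ediv_right _ _ (by omega : s ≠ 0)]
      have h3 : 0 ≤ (b - (a + s) + s - 1) / s := Int.ediv_nonneg (by omega) (by omega)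
      omega
    rw [e1, List.range_succ_eq_map]
    simp [List.map_map, Function.comp]
    intro k _
    ring
  · rw [if_neg h2]
    have e1 : (b - a + s - 1) / s = 1 := by
      have hx : b - a + s - 1 = (b - a - 1) + 1 * s := by ring
      rw [hx, Int.add_mul_ediv_right _ _ (by omega : s ≠ 0),
        Int.ediv_eq_zero_of_lt (by omega) (by omega)]
      norm_num
    rw [e1]
    simp

theorem tileLoopA_nil (chrom : String) (end_ ws : Int) (fuel : Nat) (pos : Int)
    (h : end_ ≤ pos) : tileLoopA chrom end_ ws fuel pos = [] := by
  cases fuel with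
  | zero => rfl
  | succ n => simp [tileLoopA, if_neg (by omega : ¬ pos < end_)]

-- the while-loop produces one row per range() boundary
theorem tileLoopA_eq_map (chrom : String) (end_ ws : Int) (hws : 0 < ws) :
    ∀ (fuel : Nat) (pos : Int), (end_ - pos).toNat ≤ fuel →
    tileLoopA chrom end_ ws fuel pos =
      (PySem.List.pyRange pos end_ ws).map (fun p => (chrom, p, min (p + ws) end_)) := by
  intro fuel
  induction fuel with
  | zero =>
      intro pos h
      rw [pyRange_nil_of_pos hws (by omega)]
      rfl
  | succ n ih =>
      intro pos h
      by_cases hp : pos < end_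
      · rw [pyRange_cons_of_pos hws hp]
        simp only [tileLoopA, if_pos hp, List.map_cons]
        by_cases h2 : pos + ws < end_
        · have : min (pos + ws) end_ = pos + ws := by omega
          rw [this, ih (pos + ws) (by omega)]
        · have : min (pos + ws) end_ = end_ := by omega
          rw [this, tileLoopA_nil _ _ _ _ _ (by omega),
              pyRange_nil_of_pos hws (by omega)]
          rfl
      · rw [tileLoopA_nil _ _ _ _ _ (by omega), pyRange_nil_of_pos hws (by omega)]
        rfl

-- the rows are exactly the consecutive pairs of (boundaries ++ [end_])
theorem map_eq_zipPairs (chrom : String) (end_ ws : Int) (hws : 0 < ws) :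
    ∀ (fuel : Nat) (pos : Int), (end_ - pos).toNat ≤ fuel → pos < end_ →
    (PySem.List.pyRange pos end_ ws).map (fun p => (chrom, p, min (p + ws) end_)) =
      zipPairs chrom (PySem.List.pyRange pos end_ ws ++ [end_]) := by
  intro fuel
  induction fuel with
  | zero => intro pos h hp; omega
  | succ n ih =>
      intro pos h hp
      rw [pyRange_cons_of_pos hws hp]
      by_cases h2 : pos + ws < end_
      · have hmin : min (pos + ws) end_ = pos + ws := by omega
        rw [pyRange_cons_of_pos hws h2] -- expose the head of the tail range
        have ihh := ih (pos + ws) (by omega) h2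
        rw [pyRange_cons_of_pos hws h2] at ihh
        simp only [List.cons_append] at ihh ⊢
        rw [zipPairs_cons₂, ← ihh, List.map_cons, hmin]
      · have hmin : min (pos + ws) end_ = end_ := by omega
        rw [pyRange_nil_of_pos hws (by omega)]
        simp [zipPairs, hmin]

theorem zipPairs_snoc (chrom : String) (xs : List Int) (hx : xs ≠ []) (y : Int) :
    zipPairs chrom (xs ++ [y]) = zipPairs chrom xs ++ [(chrom, xs.getLast hx, y)] := by
  induction xs with
  | nil => exact absurd rfl hx
  | cons a t ih =>
      cases t with
      | nil => simp [zipPairs]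
      | cons b t' =>
          have h' : (b :: t') ≠ [] := by simp
          have := ih h'
          simp only [zipPairs, List.cons_append, List.zip_cons_cons, List.tail_cons,
            List.map_cons] at this ⊢
          rw [this]
          simp [List.getLast_cons]

-- A's row merge corresponds to B's boundary deletion
theorem merge_eq_prune (chrom : String) (ws : Int) (bounds : List Int)
    (h2 : 2 ≤ bounds.length) :
    (match (zipPairs chrom bounds).reverse with
     | last :: prev :: rest =>
         if last.2.2 - last.2.1 < PySem.Int.floordiv ws 2 then
           ((prev.1, prev.2.1, last.2.2) :: rest).reverse
         else zipPairs chrom bounds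
     | _ => zipPairs chrom bounds) =
    zipPairs chrom
      (if 3 ≤ bounds.length ∧
          PySem.List.pyGetD bounds (-1) 0 - PySem.List.pyGetD bounds (-2) 0 <
            PySem.Int.floordiv ws 2 then
        bounds.dropLast.dropLast ++ [PySem.List.pyGetD bounds (-1) 0]
      else bounds) := by
  rcases List.eq_nil_or_concat bounds with rfl | ⟨ys, e, rfl⟩
  · simp at h2
  rcases List.eq_nil_or_concat ys with rfl | ⟨zs, p, rfl⟩
  · simp at h2
  rcases List.eq_nil_or_concat zs with rfl | ⟨us, q, rfl⟩
  · -- bounds = [p, e] : single row, no merge either side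
    simp [zipPairs]
  · -- bounds = us ++ [q, p, e]
    simp only [List.concat_eq_append] at h2 ⊢
    have hzp : (us ++ [q]) ++ [p] ≠ [] := by simp
    have hz1 := zipPairs_snoc chrom ((us ++ [q]) ++ [p]) hzp e
    have hlast1 : ((us ++ [q]) ++ [p]).getLast hzp = p := by simp
    rw [hlast1] at hz1
    have huq : us ++ [q] ≠ [] := by simp
    have hz2 := zipPairs_snoc chrom (us ++ [q]) huq p
    have hlast2 : (us ++ [q]).getLast huq = q := by simp
    rw [hlast2] at hz2
    rw [hz1, hz2]
    have hrevz : (zipPairs chrom (us ++ [q]) ++ [(chrom, q, p)] ++ [(chrom, p, e)]).reverse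
        = (chrom, p, e) :: (chrom, q, p) :: (zipPairs chrom (us ++ [q])).reverse := by
      simp
    have hg1 : PySem.List.pyGetD ((us ++ [q]) ++ [p] ++ [e]) (-1) 0 = e :=
      PySem.List.pyGetD_neg_one_append_singleton ((us ++ [q]) ++ [p]) e 0
    have hg2 : PySem.List.pyGetD ((us ++ [q]) ++ [p] ++ [e]) (-2) 0 = p := by
      rw [PySem.List.pyGetD_neg_ofNat _ 2 0 (by omega) (by simp)]
      simp
    have hdrop : ((us ++ [q]) ++ [p] ++ [e]).dropLast.dropLast = us ++ [q] := by simp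
    have hlen : 3 ≤ ((us ++ [q]) ++ [p] ++ [e]).length := by simp
    rw [hrevz, hg1, hg2, hdrop]
    simp only
    by_cases hc : e - p < PySem.Int.floordiv ws 2
    · rw [if_pos hc, if_pos ⟨hlen, hc⟩, zipPairs_snoc chrom (us ++ [q]) huq e, hlast2]
      simp
    · rw [if_neg hc, if_neg (fun hh => hc hh.2), hz1, hz2]

theorem tile_region_eq (chrom : String) (start end_ ws : Int) (hws : 0 < ws) :
    tile_region_py chrom start end_ ws = tile_region_py_alt chrom start end_ ws := by
  unfold tile_region_py tile_region_py_alt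
  by_cases h : start < end_
  · have hb : PySem.List.pyRange start end_ ws ≠ [] := by
      rw [pyRange_cons_of_pos hws h]; simp
    simp only [if_pos hb]
    rw [tileLoopA_eq_map chrom end_ ws hws _ start le_rfl,
        map_eq_zipPairs chrom end_ ws hws _ start le_rfl h]
    have h2 : 2 ≤ (PySem.List.pyRange start end_ ws ++ [end_]).length := by
      rcases List.exists_cons_of_ne_nil hb with ⟨a, t, ht⟩
      simp [ht]
    have := merge_eq_prune chrom ws (PySem.List.pyRange start end_ ws ++ [end_]) h2
    exact this.trans (by rfl)
  · have hb : PySem.List.pyRange start end_ ws = [] := pyRange_nil_of_pos hws (by omega)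
    have hr : (end_ - start).toNat = 0 := by omega
    rw [hr, hb]
    simp [tileLoopA]

-- ===== VERDICT (by name: the statement is the Claim_ definition above) =====
theorem tile_region_py_spec : Claim_equal_tile_region_py := by
  intro chrom start end_ ws _ hpre
  exact tile_region_eq chrom start end_ ws hpre
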